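-- pv_equiv track=rewrite | github.com/mybluue/sentence-extract | constructions_extract.py | pformatStr_2_bracketedTreeList
-- ===== SOURCE A (Python) =====
-- def pformatStr_2_bracketedTreeList(pformatStr):
--     bracketedTreeStr=''.join(pformatStr.split())
--     res=[]
--     curNode = ''
--     for c in bracketedTreeStr:
--         if c == ')' or c == '(':
--             if curNode:
--                 res.append(curNode)
--                 curNode = ''
--             res.append(c)
--         else:
--             curNode += c
--     return res
-- ===== SOURCE B (Python) =====
-- def pformatStr_2_bracketedTreeList(pformatStr):
--     s = ''.join(pformatStr.split())
--     res = []
--     while True: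
--         hits = [j for j in (s.find('('), s.find(')')) if j != -1]
--         if not hits:
--             return res
--         i = min(hits)
--         if i > 0:
--             res.append(s[:i])
--         res.append(s[i])
--         s = s[i + 1:]
-- ===== Notes on version B (the rewrite author's own statement) =====
-- stated objective: alternative
-- what changed: Replaces A's per-character state-machine loop (manual curNode accumulator) with a repeated str.find/slice loop that cuts the whitespace-collapsed string at each bracket, emitting the preceding run and then the bracket, and naturally stopping when no bracket remains.
import Mathlib
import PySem

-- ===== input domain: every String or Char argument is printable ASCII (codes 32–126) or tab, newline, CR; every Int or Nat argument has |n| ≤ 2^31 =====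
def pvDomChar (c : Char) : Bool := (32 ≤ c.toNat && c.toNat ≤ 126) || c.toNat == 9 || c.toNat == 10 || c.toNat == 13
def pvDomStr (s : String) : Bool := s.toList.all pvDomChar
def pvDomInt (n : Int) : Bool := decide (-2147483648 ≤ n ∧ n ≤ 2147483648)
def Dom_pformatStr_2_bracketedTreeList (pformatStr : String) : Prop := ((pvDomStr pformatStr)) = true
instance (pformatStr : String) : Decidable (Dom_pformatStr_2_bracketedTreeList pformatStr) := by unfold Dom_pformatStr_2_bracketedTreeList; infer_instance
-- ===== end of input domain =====

-- B replaces A's per-character accumulator loop by repeated bracket search (str.find) and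
-- slicing; objective: alternative (a genuinely different tokenization strategy, similar cost).

-- ===== PORT A =====
-- the for-loop of A: state = (res, curNode); a trailing curNode is dropped (A never flushes it)
def pvAGo : List Char → List String → List Char → List String
  | [], res, _curNode => res
  | c :: rest, res, curNode =>
    if c = ')' ∨ c = '(' then
      pvAGo rest ((if curNode.isEmpty then res else res ++ [String.ofList curNode]) ++ [String.ofList [c]]) []
    else
      pvAGo rest res (curNode ++ [c])

def pformatStr_2_bracketedTreeList (pformatStr : String) : List String :=
  -- bracketedTreeStr = ''.join(pformatStr.split())
  pvAGo (PySem.Chars.join [] (PySem.Chars.split₀ pformatStr.toList)) [] []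

-- ===== PORT B =====
-- find returns -1 or a genuine index (< length): needed for pvBGo's termination
theorem pv_findgo_lb (sub : List Char) : ∀ (v : List Char) (k : Nat),
    PySem.Chars.find.go sub v k = -1 ∨ (k : Int) ≤ PySem.Chars.find.go sub v k := by
  intro v
  induction v with
  | nil =>
    intro k
    rw [PySem.Chars.find.go.eq_1]
    split <;> simp
  | cons c t ih =>
    intro k
    rw [PySem.Chars.find.go.eq_2]
    split
    · right; simp
    · rcases ih (k + 1) with h | h
      · left; exact h
      · right; omega

theorem pv_find_lt_length (s : List Char) (a : Char)
    (h : PySem.Chars.find s [a] ≠ -1) :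
    0 ≤ PySem.Chars.find s [a] ∧ (PySem.Chars.find s [a]).toNat < s.length := by
  have h0 : 0 ≤ PySem.Chars.find s [a] := by
    rcases pv_findgo_lb [a] s 0 with h' | h'
    · exact absurd h' h
    · exact h'
  refine ⟨h0, ?_⟩
  have hspec := (PySem.Chars.find_spec h0).1
  have hne : List.drop (PySem.Chars.find s [a]).toNat s ≠ [] := by
    intro hnil
    rw [hnil] at hspec
    simp at hspec
  have := List.drop_eq_nil_iff.not.mp hne
  omega

theorem pv_mem_hits (s : List Char) (i : Int)
    (h : i ∈ ([PySem.Chars.find s ['('], PySem.Chars.find s [')']].filter (fun j => j != -1))) :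
    0 ≤ i ∧ i.toNat < s.length := by
  simp only [List.mem_filter, List.mem_cons, List.not_mem_nil, or_false, bne_iff_ne,
    ne_eq] at h
  rcases h with ⟨h1 | h1, h2⟩ <;> subst h1 <;> exact pv_find_lt_length s _ h2

-- the while-loop of B: cut at the first bracket each round; stops when no bracket remains
def pvBGo (s : List Char) (res : List String) : List String :=
  match hmin : PySem.List.min? ([PySem.Chars.find s ['('], PySem.Chars.find s [')']].filter (fun j => j != -1)) (fun j => j) with
  | none => res
  | some i =>
      pvBGo (PySem.Chars.slice s (some (i + 1)) none)
        ((if 0 < i then res ++ [String.ofList (PySem.Chars.slice s none (some i))] else res)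
          ++ [String.ofList [PySem.List.pyGetD s i ' ']])
  termination_by s.length
  decreasing_by
    have hmem := PySem.List.min?_mem hmin
    have hb := pv_mem_hits s i hmem
    have hi : i + 1 = ((i.toNat + 1 : Nat) : Int) := by omega
    rw [PySem.Chars.slice, hi, PySem.List.slice_from_natCast]
    simp only [List.length_drop]
    omega

def pformatStr_2_bracketedTreeList_alt (pformatStr : String) : List String :=
  pvBGo (PySem.Chars.join [] (PySem.Chars.split₀ pformatStr.toList)) []

-- ===== PRECONDITION & SPEC =====
def Spec_pformatStr_2_bracketedTreeList (pformatStr : String) (out : List String) : Prop := out = pformatStr_2_bracketedTreeList_alt pformatStr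
instance (pformatStr : String) (out : List String) : Decidable (Spec_pformatStr_2_bracketedTreeList pformatStr out) := by unfold Spec_pformatStr_2_bracketedTreeList; infer_instance

-- ===== CLAIM (what is proved, stated in full; the proofs are below) =====
def Claim_equal_pformatStr_2_bracketedTreeList : Prop := ∀ (pformatStr : String), Dom_pformatStr_2_bracketedTreeList pformatStr → Spec_pformatStr_2_bracketedTreeList pformatStr (pformatStr_2_bracketedTreeList pformatStr)

-- ===== LEMMAS AND PROOFS =====

-- A's loop walks through a bracket-free block by accumulating it onto curNode
theorem pv_aGo_skip (u : List Char) (hu : ∀ c ∈ u, c ≠ '(' ∧ c ≠ ')') :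
    ∀ (v : List Char) (res : List String) (cur : List Char),
      pvAGo (u ++ v) res cur = pvAGo v res (cur ++ u) := by
  induction u with
  | nil => intro v res cur; simp
  | cons c u ih =>
    intro v res cur
    have hc := hu c (by simp)
    have hrest : ∀ x ∈ u, x ≠ '(' ∧ x ≠ ')' := fun x hx => hu x (by simp [hx])
    simp only [List.cons_append, pvAGo]
    rw [if_neg (by tauto)]
    rw [ih hrest v res (cur ++ [c])]
    simp

-- find of a single char absent from the list is -1
theorem pv_findgo_skip (a : Char) (u : List Char) (hu : a ∉ u) :
    ∀ (v : List Char) (k : Nat),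
      PySem.Chars.find.go [a] (u ++ v) k = PySem.Chars.find.go [a] v (k + u.length) := by
  induction u with
  | nil => intro v k; simp
  | cons c u ih =>
    intro v k
    have hca : a ≠ c := by intro h; exact hu (by simp [h])
    have hrest : a ∉ u := fun h => hu (by simp [h])
    rw [List.cons_append, PySem.Chars.find.go.eq_2]
    rw [if_neg (by simp [List.isPrefixOf, hca])]
    rw [ih hrest v (k + 1)]
    congr 1
    simp; omega

theorem pv_find_not_mem (a : Char) (u : List Char) (hu : a ∉ u) :
    PySem.Chars.find u [a] = -1 := by
  have := pv_findgo_skip a u hu [] 0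
  simp only [List.append_nil] at this
  rw [PySem.Chars.find, this, PySem.Chars.find.go.eq_1]
  simp

theorem pv_find_at (a : Char) (u t : List Char) (hu : a ∉ u) :
    PySem.Chars.find (u ++ a :: t) [a] = (u.length : Int) := by
  rw [PySem.Chars.find, pv_findgo_skip a u hu (a :: t) 0, PySem.Chars.find.go.eq_2]
  rw [if_pos (by simp [List.isPrefixOf])]
  simp

theorem pv_find_after (a b : Char) (u t : List Char) (hu : a ∉ u) (hb : a ≠ b) :
    PySem.Chars.find (u ++ b :: t) [a] = -1 ∨
      (u.length : Int) + 1 ≤ PySem.Chars.find (u ++ b :: t) [a] := by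
  rw [PySem.Chars.find, pv_findgo_skip a u hu (b :: t) 0, PySem.Chars.find.go.eq_2]
  rw [if_neg (by simp [List.isPrefixOf, hb])]
  have := pv_findgo_lb [a] t (0 + u.length + 1)
  rcases this with h | h
  · left; exact h
  · right; omega

-- B does nothing on a bracket-free string
theorem pv_bGo_free (u : List Char) (hu : ∀ c ∈ u, c ≠ '(' ∧ c ≠ ')') (res : List String) :
    pvBGo u res = res := by
  have h1 : PySem.Chars.find u ['('] = -1 :=
    pv_find_not_mem '(' u (fun h => (hu _ h).1 rfl)
  have h2 : PySem.Chars.find u [')'] = -1 :=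
    pv_find_not_mem ')' u (fun h => (hu _ h).2 rfl)
  rw [pvBGo]
  split
  · rfl
  · rename_i i heq
    rw [h1, h2] at heq
    simp [PySem.List.min?] at heq

-- the first bracket of (bracket-free block) ++ bracket ++ rest is at index u.length
theorem pv_hits_min (u : List Char) (b : Char) (t : List Char)
    (hu : ∀ c ∈ u, c ≠ '(' ∧ c ≠ ')') (hb : b = '(' ∨ b = ')') :
    PySem.List.min?
      ([PySem.Chars.find (u ++ b :: t) ['('], PySem.Chars.find (u ++ b :: t) [')']].filter
        (fun j => j != -1)) (fun j => j) = some (u.length : Int) := by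
  have hul : (((u.length : Int)) != -1) = true := by
    simp only [bne_iff_ne, ne_eq]
    omega
  rcases hb with hb | hb <;> subst hb
  · have h1 : PySem.Chars.find (u ++ '(' :: t) ['('] = (u.length : Int) :=
      pv_find_at '(' u t (fun h => (hu _ h).1 rfl)
    rcases pv_find_after ')' '(' u t (fun h => (hu _ h).2 rfl) (by decide) with h2 | h2
    · have hx : (PySem.Chars.find (u ++ '(' :: t) [')'] != -1) = false := by simp [h2]
      rw [h1]
      simp [PySem.List.min?, List.filter, hul, hx]
    · have hx : (PySem.Chars.find (u ++ '(' :: t) [')'] != -1) = true := by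
        simp [bne_iff_ne]; omega
      have hnl : ¬ (PySem.Chars.find (u ++ '(' :: t) [')'] < (u.length : Int)) := by omega
      rw [h1]
      simp [PySem.List.min?, List.filter, hul, hx, hnl]
  · have h2 : PySem.Chars.find (u ++ ')' :: t) [')'] = (u.length : Int) :=
      pv_find_at ')' u t (fun h => (hu _ h).2 rfl)
    rcases pv_find_after '(' ')' u t (fun h => (hu _ h).1 rfl) (by decide) with h1 | h1
    · have hx : (PySem.Chars.find (u ++ ')' :: t) ['('] != -1) = false := by simp [h1]
      rw [h2]
      simp [PySem.List.min?, List.filter, hul, hx]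
    · have hx : (PySem.Chars.find (u ++ ')' :: t) ['('] != -1) = true := by
        simp [bne_iff_ne]; omega
      have hlt : (u.length : Int) < PySem.Chars.find (u ++ ')' :: t) ['('] := by omega
      rw [h2]
      simp [PySem.List.min?, List.filter, hul, hx, hlt]

-- one round of B on (bracket-free block) ++ bracket ++ rest
theorem pv_bGo_round (u : List Char) (b : Char) (t : List Char)
    (hu : ∀ c ∈ u, c ≠ '(' ∧ c ≠ ')') (hb : b = '(' ∨ b = ')') (res : List String) :
    pvBGo (u ++ b :: t) res
      = pvBGo t ((if u.isEmpty then res else res ++ [String.ofList u]) ++ [String.ofList [b]]) := by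
  have hmin := pv_hits_min u b t hu hb
  rw [pvBGo]
  split
  · rename_i heq
    rw [heq] at hmin
    cases hmin
  · rename_i i heq
    rw [heq] at hmin
    have hi : i = (u.length : Int) := by injection hmin
    subst hi
    have e1 : PySem.Chars.slice (u ++ b :: t) (some ((u.length : Int) + 1)) none = t := by
      rw [PySem.Chars.slice]
      have hc : ((u.length : Int) + 1) = ((u.length + 1 : Nat) : Int) := by push_cast; ring
      rw [hc, PySem.List.slice_from_natCast]
      have hs : u ++ b :: t = (u ++ [b]) ++ t := by simp
      rw [hs, List.drop_left' (by simp)]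
    have e2 : PySem.Chars.slice (u ++ b :: t) none (some (u.length : Int)) = u := by
      rw [PySem.Chars.slice, PySem.List.slice_to_natCast, List.take_left]
    have e3 : PySem.List.pyGetD (u ++ b :: t) (u.length : Int) ' ' = b := by
      rw [PySem.List.pyGetD_natCast]
      simp [List.getD_eq_getElem?_getD]
    rw [e1, e2, e3]
    by_cases hue : u = []
    · subst hue; simp
    · have h0 : 0 < u.length := List.length_pos_iff.mpr hue
      simp [hue, h0]

-- the head of dropWhile fails the predicate
theorem pv_dropWhile_head (p : Char → Bool) (l : List Char) (b : Char) (r : List Char)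
    (h : l.dropWhile p = b :: r) : p b = false := by
  induction l with
  | nil => simp at h
  | cons c l ih =>
    rw [List.dropWhile_cons] at h
    split at h
    · exact ih h
    · rename_i hpc
      cases h
      simpa using hpc

-- the main invariant: with empty pending token, A's loop equals B's loop
theorem pv_main : ∀ (n : Nat) (t : List Char), t.length ≤ n →
    ∀ (res : List String), pvAGo t res [] = pvBGo t res := by
  intro n
  induction n with
  | zero =>
    intro t ht res
    have htn : t = [] := by
      cases t with
      | nil => rfl
      | cons c l => simp at ht
    subst htn
    rw [pv_bGo_free [] (by simp) res]
    rfl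
  | succ n ih =>
    intro t ht res
    have hsplit : t.takeWhile (fun c => !(c == '(' || c == ')'))
        ++ t.dropWhile (fun c => !(c == '(' || c == ')')) = t :=
      List.takeWhile_append_dropWhile
    have hu : ∀ c ∈ t.takeWhile (fun c => !(c == '(' || c == ')')), c ≠ '(' ∧ c ≠ ')' := by
      intro c hc
      have := List.mem_takeWhile_imp hc
      simp at this
      tauto
    cases hr : t.dropWhile (fun c => !(c == '(' || c == ')')) with
    | nil =>
      have ht' : t.takeWhile (fun c => !(c == '(' || c == ')')) = t := by
        rw [hr] at hsplit
        simpa using hsplit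
      have hu' : ∀ c ∈ t, c ≠ '(' ∧ c ≠ ')' := by
        intro c hc
        exact hu c (by rw [ht']; exact hc)
      rw [pv_bGo_free t hu' res]
      have := pv_aGo_skip t hu' [] res []
      simpa [pvAGo] using this
    | cons b r' =>
      have hb : b = '(' ∨ b = ')' := by
        have := pv_dropWhile_head _ _ _ _ hr
        simp at this
        tauto
      rw [hr] at hsplit
      rw [← hsplit]
      rw [pv_aGo_skip _ hu (b :: r') res []]
      rw [pv_bGo_round _ b r' hu hb res]
      simp only [List.nil_append, pvAGo]
      rw [if_pos (by tauto)]
      apply ih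
      have := congrArg List.length hsplit
      simp at this
      omega

-- ===== VERDICT (by name: the statement is the Claim_ definition above) =====
theorem pformatStr_2_bracketedTreeList_spec : Claim_equal_pformatStr_2_bracketedTreeList := by
  intro pformatStr _
  unfold Spec_pformatStr_2_bracketedTreeList pformatStr_2_bracketedTreeList pformatStr_2_bracketedTreeList_alt
  exact pv_main _ _ le_rfl []
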